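-- pv_equiv track=rewrite | github.com/antrologos/Transcritorio | transcribe_pipeline/project_store.py | _reorder_move
-- ===== SOURCE A (Python) =====
-- def _reorder_move(
--     ordered_ids: list[str],
--     moving_id: str,
--     direction: int,
--     hidden_ids: set[str] | None = None,
-- ) -> list[str]:
--     """Move moving_id up (-1) or down (+1) by one position among visible ids."""
--     if direction not in (-1, 1):
--         raise ValueError(f"direction must be -1 or +1, got {direction}")
--     hidden = hidden_ids or set()
--     if moving_id not in ordered_ids or moving_id in hidden:
--         return list(ordered_ids)
--     visible = [iid for iid in ordered_ids if iid not in hidden]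
--     if moving_id not in visible:
--         return list(ordered_ids)
--     v_idx = visible.index(moving_id)
--     target_v_idx = v_idx + direction
--     if target_v_idx < 0 or target_v_idx >= len(visible):
--         return list(ordered_ids)
--     target_neighbor = visible[target_v_idx]
--     new = list(ordered_ids)
--     i_move = new.index(moving_id)
--     i_target = new.index(target_neighbor)
--     new[i_move], new[i_target] = new[i_target], new[i_move]
--     return new
-- ===== SOURCE B (Python) =====
-- def _reorder_move(
--     ordered_ids: list[str],
--     moving_id: str,
--     direction: int,
--     hidden_ids: set[str] | None = None,
-- ) -> list[str]:
--     """Move moving_id up (-1) or down (+1) by one position among visible ids."""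
--     if direction not in (-1, 1):
--         raise ValueError(f"direction must be -1 or +1, got {direction}")
--     hidden = hidden_ids or set()
--     if moving_id in hidden or moving_id not in ordered_ids:
--         return list(ordered_ids)
--     i = ordered_ids.index(moving_id)
--     if direction == 1:
--         target = next((x for x in ordered_ids[i + 1:] if x not in hidden), None)
--     else:
--         target = next((x for x in reversed(ordered_ids[:i]) if x not in hidden), None)
--     if target is None:
--         return list(ordered_ids)
--     new = list(ordered_ids)
--     i_move = new.index(moving_id)
--     i_target = new.index(target)
--     new[i_move], new[i_target] = new[i_target], new[i_move]
--     return new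
-- ===== Notes on version B (the rewrite author's own statement) =====
-- stated objective: alternative
-- what changed: B drops A's intermediate visible-list-with-index? decomposition: it locates moving_id in ordered_ids directly and finds the visible neighbor by scanning the adjacent slice (next non-hidden element after, or last non-hidden element before), then performs the same value-based swap.
import Mathlib
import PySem

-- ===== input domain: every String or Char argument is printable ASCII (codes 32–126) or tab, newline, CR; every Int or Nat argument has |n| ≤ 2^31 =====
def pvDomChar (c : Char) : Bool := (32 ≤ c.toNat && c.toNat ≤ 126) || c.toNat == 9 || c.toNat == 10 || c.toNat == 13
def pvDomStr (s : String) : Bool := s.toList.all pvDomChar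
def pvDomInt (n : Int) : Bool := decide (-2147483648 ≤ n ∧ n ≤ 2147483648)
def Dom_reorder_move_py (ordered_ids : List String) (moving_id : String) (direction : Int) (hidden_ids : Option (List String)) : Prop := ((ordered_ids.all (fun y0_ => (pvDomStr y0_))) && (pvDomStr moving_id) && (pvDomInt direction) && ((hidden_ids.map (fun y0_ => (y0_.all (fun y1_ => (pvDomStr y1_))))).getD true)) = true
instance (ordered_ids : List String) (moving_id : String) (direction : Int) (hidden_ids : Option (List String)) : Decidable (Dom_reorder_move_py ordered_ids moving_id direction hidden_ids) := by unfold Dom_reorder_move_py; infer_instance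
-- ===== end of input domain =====

-- B replaces A's "build the visible list, index into it" decomposition by a direct
-- outward scan from moving_id's position (a slice + first-match), same swap; objective: alternative decomposition, not faster.

-- ===== PORT A =====
-- literal port of A; the ValueError for direction ∉ {-1, 1} is excluded by Pre_ below
def reorder_move_py (ordered_ids : List String) (moving_id : String) (direction : Int) (hidden_ids : Option (List String)) : List String :=
  let hidden := hidden_ids.getD []    -- `hidden_ids or set()`
  if ¬ (moving_id ∈ ordered_ids) ∨ moving_id ∈ hidden then ordered_ids
  else
    let visible := ordered_ids.filter (fun iid => !hidden.contains iid)
    if ¬ (moving_id ∈ visible) then ordered_ids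
    else
      match PySem.List.index? visible moving_id with
      | none => ordered_ids            -- unreachable: moving_id ∈ visible
      | some v_idx =>
        let target_v_idx : Int := (v_idx : Int) + direction
        if target_v_idx < 0 ∨ (visible.length : Int) ≤ target_v_idx then ordered_ids
        else
          match PySem.List.pyGet? visible target_v_idx with
          | none => ordered_ids        -- unreachable: index in range
          | some target_neighbor =>
            let new := ordered_ids
            match PySem.List.index? new moving_id, PySem.List.index? new target_neighbor with
            | some i_move, some i_target =>
                let vM := (new[i_move]?).getD ""
                let vT := (new[i_target]?).getD ""
                (new.set i_move vT).set i_target vM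
            | _, _ => ordered_ids      -- unreachable: both present

-- ===== PORT B =====
def reorder_move_py_alt (ordered_ids : List String) (moving_id : String) (direction : Int) (hidden_ids : Option (List String)) : List String :=
  let hidden := hidden_ids.getD []
  if moving_id ∈ hidden ∨ ¬ (moving_id ∈ ordered_ids) then ordered_ids
  else
    match PySem.List.index? ordered_ids moving_id with
    | some i =>
      let target? :=
        if direction = 1 then
          (PySem.List.slice ordered_ids (some ((i : Int) + 1)) none).find? (fun x => !hidden.contains x)
        else
          (PySem.List.slice ordered_ids none (some (i : Int))).reverse.find? (fun x => !hidden.contains x)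
      match target? with
      | some target =>
        let new := ordered_ids
        match PySem.List.index? new moving_id with
        | some i_move =>
          match PySem.List.index? new target with
          | some i_target =>
              let vM := (new[i_move]?).getD ""
              let vT := (new[i_target]?).getD ""
              (new.set i_move vT).set i_target vM
          | none => ordered_ids        -- unreachable: target ∈ ordered_ids
        | none => ordered_ids          -- unreachable: moving_id ∈ ordered_ids
      | none => ordered_ids
    | none => ordered_ids              -- unreachable: moving_id ∈ ordered_ids

-- ===== PRECONDITION & SPEC =====
-- Pre_ excludes exactly the inputs where A raises ValueError (direction not in (-1, 1)).
def Pre_reorder_move_py (ordered_ids : List String) (moving_id : String) (direction : Int) (hidden_ids : Option (List String)) : Prop :=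
  direction = -1 ∨ direction = 1
instance (ordered_ids : List String) (moving_id : String) (direction : Int) (hidden_ids : Option (List String)) : Decidable (Pre_reorder_move_py ordered_ids moving_id direction hidden_ids) := by unfold Pre_reorder_move_py; infer_instance

def pvWitness_reorder_move_py : List String × String × Int × Option (List String) :=
  (["a", "b", "c"], "b", 1, some ["c"])

def Spec_reorder_move_py (ordered_ids : List String) (moving_id : String) (direction : Int) (hidden_ids : Option (List String)) (out : List String) : Prop := out = reorder_move_py_alt ordered_ids moving_id direction hidden_ids
instance (ordered_ids : List String) (moving_id : String) (direction : Int) (hidden_ids : Option (List String)) (out : List String) : Decidable (Spec_reorder_move_py ordered_ids moving_id direction hidden_ids out) := by unfold Spec_reorder_move_py; infer_instance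

-- ===== CLAIM (what is proved, stated in full; the proofs are below) =====
def Claim_equal_reorder_move_py : Prop := ∀ (ordered_ids : List String) (moving_id : String) (direction : Int) (hidden_ids : Option (List String)), Dom_reorder_move_py ordered_ids moving_id direction hidden_ids → Pre_reorder_move_py ordered_ids moving_id direction hidden_ids → Spec_reorder_move_py ordered_ids moving_id direction hidden_ids (reorder_move_py ordered_ids moving_id direction hidden_ids)

-- ===== LEMMAS AND PROOFS =====

theorem pv_index?_middle {α : Type} [BEq α] [LawfulBEq α] (l t : List α) (c : α) (h : c ∉ l) :
    PySem.List.index? (l ++ c :: t) c = some l.length := by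
  rw [PySem.List.index?_eq_some_iff]
  exact ⟨l, t, rfl, rfl, h⟩

-- ===== VERDICT (by name: the statement is the Claim_ definition above) =====
theorem reorder_move_py_spec : Claim_equal_reorder_move_py := by
  intro ordered moving dir hidden_ids _hdom hpre
  unfold Spec_reorder_move_py reorder_move_py reorder_move_py_alt
  set hidden := hidden_ids.getD [] with hh
  by_cases hmem : moving ∈ ordered
  case neg => simp [hmem]
  by_cases hhid : moving ∈ hidden
  case pos => simp [hmem, hhid]
  obtain ⟨i, hi⟩ : ∃ i, PySem.List.index? ordered moving = some i := by
    have := (PySem.List.index?_isSome_iff (xs := ordered) (v := moving)).mpr hmem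
    exact Option.isSome_iff_exists.mp this
  obtain ⟨pre, suf, hsplit, hlen, hnotpre⟩ := (PySem.List.index?_eq_some_iff _ _ _).mp hi
  subst hsplit
  subst hlen
  have hfil : (pre ++ moving :: suf).filter (fun x => !hidden.contains x)
      = pre.filter (fun x => !hidden.contains x) ++ moving :: suf.filter (fun x => !hidden.contains x) := by
    simp [List.filter_append, hhid]
  have hnotfpre : moving ∉ pre.filter (fun x => !hidden.contains x) :=
    fun hx => hnotpre (List.mem_of_mem_filter hx)
  have hmemvis : moving ∈ (pre ++ moving :: suf).filter (fun x => !hidden.contains x) := by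
    rw [hfil]; simp
  have hidx2 : PySem.List.index? ((pre ++ moving :: suf).filter (fun x => !hidden.contains x)) moving
      = some (pre.filter (fun x => !hidden.contains x)).length := by
    rw [hfil]; exact pv_index?_middle _ _ _ hnotfpre
  have hdropEq : PySem.List.slice (pre ++ moving :: suf) (some ((pre.length : Int) + 1)) none = suf := by
    have h1 : ((pre.length : Int) + 1) = (((pre.length + 1 : Nat)) : Int) := by push_cast; ring
    rw [h1, PySem.List.slice_from_natCast]
    have h2 : pre ++ moving :: suf = (pre ++ [moving]) ++ suf := by simp
    rw [h2, List.drop_left' (by simp)]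
  have htakeEq : PySem.List.slice (pre ++ moving :: suf) none (some ((pre.length : Int))) = pre := by
    rw [PySem.List.slice_to_natCast, List.take_left]
  have hneg1 : ¬(¬(moving ∈ pre ++ moving :: suf) ∨ moving ∈ hidden) := by
    simp [hmem, hhid]
  have hneg1' : ¬(moving ∈ hidden ∨ ¬(moving ∈ pre ++ moving :: suf)) := by
    simp [hmem, hhid]
  have hneg2' : ¬¬(moving ∈ (pre.filter (fun iid => !hidden.contains iid))
      ++ moving :: (suf.filter (fun iid => !hidden.contains iid))) :=
    not_not_intro (by simp)
  have hidx2' : PySem.List.index?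
      ((pre.filter (fun iid => !hidden.contains iid)) ++ moving :: (suf.filter (fun iid => !hidden.contains iid))) moving
      = some (pre.filter (fun iid => !hidden.contains iid)).length :=
    pv_index?_middle _ _ _ hnotfpre
  rcases hpre with hdir | hdir <;> subst hdir
  · -- direction = -1
    by_cases hfp : pre.filter (fun iid => !hidden.contains iid) = []
    · have hb : pre.reverse.find? (fun iid => !hidden.contains iid) = none := by
        rw [← List.getLast?_filter, hfp]; rfl
      simp only [if_neg hneg1, if_neg hneg1', hfil, if_neg hneg2', hidx2', hi,
        htakeEq, hb, if_neg (show ¬((-1 : Int) = 1) from by decide)]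
      split_ifs with hC
      · rfl
      · exact absurd (Or.inl (by rw [hfp]; simp)) hC
    · obtain ⟨t, ht⟩ : ∃ t, (pre.filter (fun iid => !hidden.contains iid)).getLast? = some t := by
        have := (List.getLast?_isSome (l := pre.filter (fun iid => !hidden.contains iid))).mpr hfp
        exact Option.isSome_iff_exists.mp this
      have hb : pre.reverse.find? (fun iid => !hidden.contains iid) = some t := by
        rw [← List.getLast?_filter]; exact ht
      have hvp : 1 ≤ (pre.filter (fun iid => !hidden.contains iid)).length :=
        List.length_pos_iff.mpr hfp
      have hget : PySem.List.pyGet?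
          ((pre.filter (fun iid => !hidden.contains iid)) ++ moving :: (suf.filter (fun iid => !hidden.contains iid)))
          (((pre.filter (fun iid => !hidden.contains iid)).length : Int) + (-1)) = some t := by
        have h1 : ((pre.filter (fun iid => !hidden.contains iid)).length : Int) + (-1)
            = (((pre.filter (fun iid => !hidden.contains iid)).length - 1 : Nat) : Int) := by omega
        rw [h1, PySem.List.pyGet?_natCast, List.getElem?_append_left (by omega),
          ← List.getLast?_eq_getElem?]
        exact ht
      simp only [if_neg hneg1, if_neg hneg1', hfil, if_neg hneg2', hidx2', hi,
        htakeEq, hb, if_neg (show ¬((-1 : Int) = 1) from by decide), hget]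
      split_ifs with hC
      · exfalso
        rcases hC with h | h
        · omega
        · rw [List.length_append, List.length_cons] at h
          push_cast at h
          omega
      · have htmem : t ∈ pre ++ moving :: suf :=
          List.mem_append_left _ (List.mem_reverse.mp (List.mem_of_find?_eq_some hb))
        obtain ⟨it, hit⟩ := Option.isSome_iff_exists.mp
          ((PySem.List.index?_isSome_iff (pre ++ moving :: suf) t).mpr htmem)
        simp only [hit]
  · -- direction = 1
    by_cases hfs : suf.filter (fun iid => !hidden.contains iid) = []
    · have hb : suf.find? (fun iid => !hidden.contains iid) = none := by
        rw [← List.head?_filter, hfs]; rfl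
      simp only [if_neg hneg1, if_neg hneg1', hfil, if_neg hneg2', hidx2', hi,
        hdropEq, hb]
      split_ifs with hC
      · rfl
      · refine absurd (Or.inr ?_) hC
        rw [hfs, List.length_append, List.length_cons, List.length_nil]
        push_cast
        omega
    · obtain ⟨t, rest, hts⟩ : ∃ t rest, suf.filter (fun iid => !hidden.contains iid) = t :: rest := by
        cases h : suf.filter (fun iid => !hidden.contains iid) with
        | nil => exact absurd h hfs
        | cons a b => exact ⟨a, b, rfl⟩
      have hb : suf.find? (fun iid => !hidden.contains iid) = some t := by
        rw [← List.head?_filter, hts]; rfl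
      have hget : PySem.List.pyGet?
          ((pre.filter (fun iid => !hidden.contains iid)) ++ moving :: (suf.filter (fun iid => !hidden.contains iid)))
          (((pre.filter (fun iid => !hidden.contains iid)).length : Int) + 1) = some t := by
        rw [hts]
        have h1 : ((pre.filter (fun iid => !hidden.contains iid)).length : Int) + 1
            = (((pre.filter (fun iid => !hidden.contains iid)).length + 1 : Nat) : Int) := by push_cast; ring
        rw [h1, PySem.List.pyGet?_natCast, List.getElem?_append_right (by omega)]
        simp
      simp only [if_neg hneg1, if_neg hneg1', hfil, if_neg hneg2', hidx2', hi,
        hdropEq, hb, hget]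
      split_ifs with hC
      · exfalso
        rcases hC with h | h
        · omega
        · rw [hts, List.length_append, List.length_cons, List.length_cons] at h
          push_cast at h
          omega
      · have htmem : t ∈ pre ++ moving :: suf :=
          List.mem_append_right _ (List.mem_cons_of_mem _ (List.mem_of_find?_eq_some hb))
        obtain ⟨it, hit⟩ := Option.isSome_iff_exists.mp
          ((PySem.List.index?_isSome_iff (pre ++ moving :: suf) t).mpr htmem)
        simp only [hit]
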